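-- pv_equiv track=rewrite | github.com/alisazosimova/algorithms | two_sum.py | sum_pairs1
-- ===== SOURCE A (Python) =====
-- def sum_pairs1(nums, target):
--     pairs = []
--     for n in nums:
--         a = target - n
--         n_index = nums.index(n)
--         if a in nums[n_index+1:]:
--             a_index = nums[n_index+1:].index(a) + nums.index(n) +1
--             pairs.append([a_index, n_index])
--     if pairs:
--         pairs.sort()
--         i_2, i_1 = pairs[0]
--         return [nums[i_1], nums[i_2]]
-- ===== SOURCE B (Python) =====
-- def sum_pairs1(nums, target):
--     seen = set()
--     for v in nums:
--         if target - v in seen: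
--             return [target - v, v]
--         seen.add(v)
-- ===== Notes on version B (the rewrite author's own statement) =====
-- stated objective: faster
-- what changed: A collects every candidate pair with repeated list.index/slice scans, sorts the pair list and returns the lexicographic minimum; B is the standard single pass with a seen-set returning at the first element whose complement has already been scanned.
import Mathlib
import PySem

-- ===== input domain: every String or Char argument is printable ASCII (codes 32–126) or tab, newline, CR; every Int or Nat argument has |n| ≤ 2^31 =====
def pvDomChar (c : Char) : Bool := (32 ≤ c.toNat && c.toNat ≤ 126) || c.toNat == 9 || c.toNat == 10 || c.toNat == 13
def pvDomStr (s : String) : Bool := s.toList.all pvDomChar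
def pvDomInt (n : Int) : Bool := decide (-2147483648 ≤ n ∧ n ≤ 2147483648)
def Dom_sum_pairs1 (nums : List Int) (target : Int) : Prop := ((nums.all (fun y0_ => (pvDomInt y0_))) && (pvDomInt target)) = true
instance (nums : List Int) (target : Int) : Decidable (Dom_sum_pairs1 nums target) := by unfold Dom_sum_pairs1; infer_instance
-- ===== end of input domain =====

-- B replaces A's quadratic collect-all-pairs-then-sort with the standard single pass over a
-- seen-set that returns at the first element whose complement was already scanned (objective: faster).

-- ===== PORT A =====
-- helper: the candidate pair A's loop body computes for the loop value n
def aPairOf (nums : List Int) (target : Int) (n : Int) : Option (Int × Int) :=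
  let a := target - n
  match PySem.List.index? nums n with
  | none => none        -- unreachable: n is drawn from nums, so nums.index(n) succeeds
  | some n_index =>
    let rest := PySem.List.slice nums (some ((n_index : Int) + 1)) none
    if a ∈ rest then
      match PySem.List.index? rest a with
      | none => none    -- unreachable: the membership test just succeeded
      | some k => some ((k : Int) + (n_index : Int) + 1, (n_index : Int))
    else none

def sum_pairs1 (nums : List Int) (target : Int) : Option (List Int) :=
  let pairs : List (Int × Int) :=
    nums.foldl (fun acc n =>
      match aPairOf nums target n with
      | some p => acc ++ [p]
      | none => acc) []
  if pairs ≠ [] then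
    match PySem.List.sorted pairs (fun p => toLex p) with
    | [] => none      -- unreachable: pairs ≠ []
    | (i_2, i_1) :: _ =>
      match PySem.List.pyGet? nums i_1, PySem.List.pyGet? nums i_2 with
      | some x, some y => some [x, y]
      | _, _ => none  -- unreachable: both indices point into nums
  else none

-- ===== PORT B =====
-- the for-loop of Source B: `seen` is the set of already-scanned values
def altGo (target : Int) : List Int → PySem.Set Int → Option (List Int)
  | [], _ => none
  | v :: rest, seen =>
    if (target - v) ∈ seen then some [target - v, v]
    else altGo target rest (PySem.Set.add seen v)

def sum_pairs1_alt (nums : List Int) (target : Int) : Option (List Int) :=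
  altGo target nums PySem.Set.empty

-- ===== PRECONDITION & SPEC =====
def Spec_sum_pairs1 (nums : List Int) (target : Int) (out : Option (List Int)) : Prop := out = sum_pairs1_alt nums target
instance (nums : List Int) (target : Int) (out : Option (List Int)) : Decidable (Spec_sum_pairs1 nums target out) := by unfold Spec_sum_pairs1; infer_instance

-- ===== CLAIM (what is proved, stated in full; the proofs are below) =====
def Claim_equal_sum_pairs1 : Prop := ∀ (nums : List Int) (target : Int), Dom_sum_pairs1 nums target → Spec_sum_pairs1 nums target (sum_pairs1 nums target)

-- ===== LEMMAS AND PROOFS =====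

-- `GoodAt nums target j i` says: index j holds a value v whose complement target - v first occurs
-- at index i, with i < j and no occurrence of v strictly between i and j — exactly the pairs
-- [j, i] that A collects.
def GoodAt (nums : List Int) (target : Int) (j i : Nat) : Prop :=
  ∃ v, nums[j]? = some v ∧ List.idxOf? (target - v) nums = some i ∧ i < j ∧
    ∀ k, i < k → k < j → nums[k]? ≠ some v

-- `Fires nums target j`: B's scan condition holds at index j (the complement of nums[j]
-- occurs strictly before j).
def Fires (nums : List Int) (target : Int) (j : Nat) : Prop :=
  ∃ v i, nums[j]? = some v ∧ i < j ∧ nums[i]? = some (target - v)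

lemma idxOf?_some_facts {l : List Int} {a : Int} {i : Nat} (h : List.idxOf? a l = some i) :
    l[i]? = some a ∧ ∀ j, j < i → l[j]? ≠ some a := by
  rw [List.idxOf?_eq_some_iff] at h
  obtain ⟨hlen, hval, hmin⟩ := h
  refine ⟨by simp [List.getElem?_eq_getElem hlen, hval], ?_⟩
  intro j hj hcontra
  have hjl : j < l.length := by omega
  rw [List.getElem?_eq_getElem hjl] at hcontra
  exact hmin j hj (by injection hcontra)

lemma idxOf?_eq_of {l : List Int} {a : Int} {i : Nat}
    (hi : l[i]? = some a) (hmin : ∀ j, j < i → l[j]? ≠ some a) :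
    List.idxOf? a l = some i := by
  rw [List.idxOf?_eq_some_iff]
  rw [List.getElem?_eq_some_iff] at hi
  obtain ⟨hlen, hval⟩ := hi
  refine ⟨hlen, hval, ?_⟩
  intro j hj hcontra
  exact hmin j hj (by rw [List.getElem?_eq_getElem (by omega)]; exact congrArg some hcontra)

lemma pairs_eq_filterMap (nums : List Int) (target : Int) :
    ∀ (l : List Int) (acc : List (Int × Int)),
      l.foldl (fun acc n =>
        match aPairOf nums target n with
        | some p => acc ++ [p]
        | none => acc) acc = acc ++ l.filterMap (aPairOf nums target) := by
  intro l
  induction l with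
  | nil => intro acc; simp
  | cons n l ih =>
      intro acc
      simp only [List.foldl_cons, List.filterMap_cons]
      cases h : aPairOf nums target n <;> simp [ih]

lemma aPairOf_some (nums : List Int) (target : Int) (n : Int) (p : Int × Int)
    (_hmem : n ∈ nums) (h : aPairOf nums target n = some p) :
    ∃ j i : Nat, p = ((j : Int), (i : Int)) ∧ GoodAt nums target j i := by
  unfold aPairOf at h
  simp only [PySem.List.index?] at h
  cases hidx : List.idxOf? n nums with
  | none => rw [hidx] at h; simp at h
  | some i =>
    rw [hidx] at h
    dsimp only at h
    have htn : ((i : Int) + 1).toNat = i + 1 := by omega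
    rw [PySem.List.slice_from _ (by omega), htn] at h
    by_cases hin : (target - n) ∈ nums.drop (i + 1)
    · rw [if_pos hin] at h
      cases hk : List.idxOf? (target - n) (nums.drop (i + 1)) with
      | none => rw [hk] at h; simp at h
      | some k =>
        rw [hk] at h
        simp only [Option.some.injEq] at h
        obtain ⟨hkval, hkmin⟩ := idxOf?_some_facts hk
        obtain ⟨hival, himin⟩ := idxOf?_some_facts hidx
        refine ⟨i + 1 + k, i, ?_, ?_⟩
        · rw [← h]
          have : ((i + 1 + k : Nat) : Int) = (k : Int) + (i : Int) + 1 := by push_cast; ring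
          rw [this]
        · refine ⟨target - n, ?_, ?_, by omega, ?_⟩
          · rw [← List.getElem?_drop]; exact hkval
          · rw [sub_sub_cancel]; exact hidx
          · intro k' hik' hk'j hcontra
            have hk'i : i + 1 ≤ k' := by omega
            apply hkmin (k' - (i + 1)) (by omega)
            rw [List.getElem?_drop]
            rw [Nat.add_sub_cancel' hk'i]
            exact hcontra
    · rw [if_neg hin] at h; simp at h

lemma goodAt_pair (nums : List Int) (target : Int) (j i : Nat)
    (h : GoodAt nums target j i) :
    ∃ n ∈ nums, aPairOf nums target n = some ((j : Int), (i : Int)) := by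
  obtain ⟨v, hj, hidx, hij, hbet⟩ := h
  obtain ⟨hival, himin⟩ := idxOf?_some_facts hidx
  refine ⟨target - v, List.mem_of_getElem? hival, ?_⟩
  unfold aPairOf
  simp only [PySem.List.index?, sub_sub_cancel]
  rw [hidx]
  dsimp only
  have htn : ((i : Int) + 1).toNat = i + 1 := by omega
  rw [PySem.List.slice_from _ (by omega), htn]
  have hdropj : (nums.drop (i + 1))[j - (i + 1)]? = some v := by
    rw [List.getElem?_drop, Nat.add_sub_cancel' (by omega)]
    exact hj
  have hmem : v ∈ nums.drop (i + 1) := List.mem_of_getElem? hdropj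
  rw [if_pos hmem]
  have hidx2 : List.idxOf? v (nums.drop (i + 1)) = some (j - (i + 1)) := by
    apply idxOf?_eq_of hdropj
    intro m hm hcontra
    rw [List.getElem?_drop] at hcontra
    exact hbet (i + 1 + m) (by omega) (by omega) hcontra
  rw [hidx2]
  dsimp only
  have : ((j - (i + 1) : Nat) : Int) + (i : Int) + 1 = (j : Int) := by
    have : i + 1 ≤ j := by omega
    push_cast [Nat.cast_sub this]
    ring
  rw [this]

-- A GoodAt index fires B's condition
lemma goodAt_fires (nums : List Int) (target : Int) (j i : Nat)
    (h : GoodAt nums target j i) : Fires nums target j := by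
  obtain ⟨v, hj, hidx, hij, _⟩ := h
  exact ⟨v, i, hj, hij, (idxOf?_some_facts hidx).1⟩

-- A fire of B's condition at j yields a GoodAt index at some k ≤ j
lemma fires_goodAt (nums : List Int) (target : Int) (j : Nat)
    (h : Fires nums target j) : ∃ k, k ≤ j ∧ ∃ i, GoodAt nums target k i := by
  obtain ⟨v, i, hj, hij, hi⟩ := h
  -- c = target - v, first occurrence i0 ≤ i
  obtain ⟨i0, hi0⟩ := Option.isSome_iff_exists.1
    ((List.isSome_idxOf? (l := nums) (a := target - v)).2 (List.mem_of_getElem? hi))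
  obtain ⟨hi0val, hi0min⟩ := idxOf?_some_facts hi0
  have hi0le : i0 ≤ i := by
    by_contra hlt
    exact hi0min i (by omega) hi
  -- v occurs in nums.drop (i0+1) (at j - (i0+1))
  have hdropj : (nums.drop (i0 + 1))[j - (i0 + 1)]? = some v := by
    rw [List.getElem?_drop, Nat.add_sub_cancel' (by omega)]
    exact hj
  obtain ⟨m, hm⟩ := Option.isSome_iff_exists.1
    ((List.isSome_idxOf? (l := nums.drop (i0 + 1)) (a := v)).2 (List.mem_of_getElem? hdropj))
  obtain ⟨hmval, hmmin⟩ := idxOf?_some_facts hm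
  have hmle : m ≤ j - (i0 + 1) := by
    by_contra hlt
    exact hmmin (j - (i0 + 1)) (by omega) hdropj
  refine ⟨i0 + 1 + m, by omega, i0, v, ?_, ?_, by omega, ?_⟩
  · rw [← List.getElem?_drop]; exact hmval
  · exact hi0
  · intro k hik hkm hcontra
    apply hmmin (k - (i0 + 1)) (by omega)
    rw [List.getElem?_drop, Nat.add_sub_cancel' (by omega)]
    exact hcontra

-- seen-set invariant: after scanning jn elements, seen holds exactly the values of nums.take jn
def SI (nums : List Int) (jn : Nat) (seen : PySem.Set Int) : Prop :=
  ∀ w, w ∈ seen ↔ ∃ i, i < jn ∧ nums[i]? = some w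

lemma si_zero (nums : List Int) : SI nums 0 PySem.Set.empty := by
  intro w
  constructor
  · intro h; cases h
  · rintro ⟨i, hi, _⟩; omega

lemma si_step (nums : List Int) (jn : Nat) (seen : PySem.Set Int) (v : Int)
    (hv : nums[jn]? = some v) (hs : SI nums jn seen) :
    SI nums (jn + 1) (PySem.Set.add seen v) := by
  intro w
  rw [PySem.Set.mem_add]
  constructor
  · rintro (h | rfl)
    · obtain ⟨i, hi, hw⟩ := (hs w).1 h
      exact ⟨i, by omega, hw⟩
    · exact ⟨jn, by omega, hv⟩
  · rintro ⟨i, hi, hw⟩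
    rcases Nat.lt_succ_iff_lt_or_eq.1 hi with h | rfl
    · exact Or.inl ((hs w).2 ⟨i, h, hw⟩)
    · right
      rw [hv] at hw; injection hw with h'; exact h'.symm

lemma hit_iff (nums : List Int) (target : Int) (jn : Nat) (seen : PySem.Set Int) (v : Int)
    (hv : nums[jn]? = some v) (hs : SI nums jn seen) :
    (target - v) ∈ seen ↔ Fires nums target jn := by
  rw [hs (target - v)]
  constructor
  · rintro ⟨i, hi, hw⟩
    exact ⟨v, i, hv, hi, hw⟩
  · rintro ⟨v', i, hv', hi, hw⟩
    rw [hv] at hv'; injection hv' with h'; subst h'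
    exact ⟨i, hi, hw⟩

lemma drop_cons_facts (nums : List Int) (jn : Nat) (v : Int) (rest : List Int)
    (h : nums.drop jn = v :: rest) :
    nums[jn]? = some v ∧ rest = nums.drop (jn + 1) := by
  constructor
  · have h0 : (nums.drop jn)[0]? = nums[jn + 0]? := List.getElem?_drop ..
    simpa [h] using h0.symm
  · have h1 : (nums.drop jn).drop 1 = nums.drop (jn + 1) := by
      rw [List.drop_drop]
    simpa [h] using h1

lemma altGo_none (nums : List Int) (target : Int) :
    ∀ (l : List Int) (jn : Nat) (seen : PySem.Set Int),
      l = nums.drop jn → SI nums jn seen →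
      (∀ j', jn ≤ j' → ¬ Fires nums target j') →
      altGo target l seen = none := by
  intro l
  induction l with
  | nil => intro jn seen _ _ _; rfl
  | cons v rest ih =>
    intro jn seen heq hs hno
    obtain ⟨hv, hrest⟩ := drop_cons_facts nums jn v rest heq.symm
    simp only [altGo]
    rw [if_neg]
    · exact ih (jn + 1) _ hrest (si_step nums jn seen v hv hs) (fun j' hj' => hno j' (by omega))
    · intro hmem
      exact hno jn le_rfl ((hit_iff nums target jn seen v hv hs).1 hmem)

lemma altGo_some (nums : List Int) (target : Int) (jstar : Nat) (vstar : Int)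
    (hvs : nums[jstar]? = some vstar)
    (hfire : Fires nums target jstar)
    (hmin : ∀ j', j' < jstar → ¬ Fires nums target j') :
    ∀ (l : List Int) (jn : Nat) (seen : PySem.Set Int),
      l = nums.drop jn → SI nums jn seen → jn ≤ jstar →
      altGo target l seen = some [target - vstar, vstar] := by
  intro l
  induction l with
  | nil =>
    intro jn seen heq _ hle
    exfalso
    have hlen : nums.length ≤ jn := by
      rw [← List.drop_eq_nil_iff]
      exact heq.symm
    rw [List.getElem?_eq_none (by omega)] at hvs
    simp at hvs
  | cons v rest ih =>
    intro jn seen heq hs hle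
    obtain ⟨hv, hrest⟩ := drop_cons_facts nums jn v rest heq.symm
    by_cases hjj : jn = jstar
    · subst hjj
      obtain rfl : v = vstar := by rw [hv] at hvs; injection hvs
      simp only [altGo]
      rw [if_pos ((hit_iff nums target jn seen v hv hs).2 hfire)]
    · have hjlt : jn < jstar := by omega
      simp only [altGo]
      rw [if_neg]
      · exact ih (jn + 1) _ hrest (si_step nums jn seen v hv hs) (by omega)
      · intro hmem
        exact hmin jn hjlt ((hit_iff nums target jn seen v hv hs).1 hmem)

-- ===== VERDICT (by name: the statement is the Claim_ definition above) =====
theorem sum_pairs1_spec : Claim_equal_sum_pairs1 := by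
  unfold Claim_equal_sum_pairs1
  intro nums target _
  unfold Spec_sum_pairs1 sum_pairs1 sum_pairs1_alt
  rw [pairs_eq_filterMap]
  simp only [List.nil_append]
  by_cases hne : nums.filterMap (aPairOf nums target) = []
  · rw [hne]
    simp only [ne_eq, not_true_eq_false, if_false]
    have hB := altGo_none nums target nums 0 PySem.Set.empty (by simp) (si_zero nums) ?_
    · rw [hB]
    · rintro j' _ hf
      obtain ⟨k, _, i, hg⟩ := fires_goodAt nums target j' hf
      obtain ⟨n, hn, hpair⟩ := goodAt_pair nums target k i hg
      have hmemp : ((k : Int), (i : Int)) ∈ nums.filterMap (aPairOf nums target) :=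
        List.mem_filterMap.2 ⟨n, hn, hpair⟩
      rw [hne] at hmemp
      simp at hmemp
  · rw [if_pos hne]
    cases hs : PySem.List.sorted (nums.filterMap (aPairOf nums target)) (fun p => toLex p) with
    | nil =>
      exfalso
      have hperm := PySem.List.sorted_perm (nums.filterMap (aPairOf nums target)) (fun p => toLex p) false
      rw [hs] at hperm
      exact hne hperm.symm.eq_nil
    | cons hd tl =>
      obtain ⟨i2, i1⟩ := hd
      have hperm := PySem.List.sorted_perm (nums.filterMap (aPairOf nums target)) (fun p => toLex p) false
      rw [hs] at hperm
      have hmemh : (i2, i1) ∈ nums.filterMap (aPairOf nums target) :=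
        hperm.subset (List.mem_cons_self ..)
      obtain ⟨n, hn, hpair⟩ := List.mem_filterMap.1 hmemh
      obtain ⟨jh, ihh, heq2, hgood⟩ := aPairOf_some nums target n _ hn hpair
      obtain ⟨hi2, hi1⟩ := Prod.mk.injEq .. ▸ heq2
      subst hi2; subst hi1
      obtain ⟨vh, hjh, hidx, hij, hbet⟩ := hgood
      have hmin : ∀ j', j' < jh → ¬ ∃ i, GoodAt nums target j' i := by
        rintro j' hj' ⟨i', hg'⟩
        obtain ⟨n', hn', hpair'⟩ := goodAt_pair nums target j' i' hg'
        have hmem' : ((j' : Int), (i' : Int)) ∈ nums.filterMap (aPairOf nums target) :=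
          List.mem_filterMap.2 ⟨n', hn', hpair'⟩
        have hx := hperm.symm.subset hmem'
        have hpw := PySem.List.sorted_pairwise (nums.filterMap (aPairOf nums target)) (fun p => toLex p)
        rw [hs] at hpw
        rcases List.mem_cons.1 hx with hcase | hcase
        · injection hcase with ha hb
          have : j' = jh := by exact_mod_cast ha
          omega
        · have hle := (List.pairwise_cons.1 hpw).1 _ hcase
          rw [Prod.Lex.le_iff] at hle
          rcases hle with hlt | ⟨heqq, _⟩
          · simp only [ofLex_toLex] at hlt
            have : jh < j' := by exact_mod_cast hlt
            omega
          · simp only [ofLex_toLex] at heqq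
            have : jh = j' := by exact_mod_cast heqq
            omega
      have hminF : ∀ j', j' < jh → ¬ Fires nums target j' := by
        intro j' hj' hf
        obtain ⟨k, hk, i, hg⟩ := fires_goodAt nums target j' hf
        exact hmin k (by omega) ⟨i, hg⟩
      obtain ⟨hival, _⟩ := idxOf?_some_facts hidx
      dsimp only
      rw [PySem.List.pyGet?_natCast, PySem.List.pyGet?_natCast, hival, hjh]
      dsimp only
      have hB := altGo_some nums target jh vh hjh
        (goodAt_fires nums target jh ihh ⟨vh, hjh, hidx, hij, hbet⟩) hminF
        nums 0 PySem.Set.empty (by simp) (si_zero nums) (Nat.zero_le _)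
      rw [hB]
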